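-- pv_equiv track=rewrite | github.com/jessicaribeiroalves/python-practice | sixth-assessment.py | check_if_string_can_be_written
-- ===== SOURCE A (Python) =====
-- def check_if_string_can_be_written(frequencies, string):
--     string_frequencies = {}
--     for char in string:
--         string_frequencies[char] = string_frequencies.get(char, 0) + 1
--     for char, frequency in string_frequencies.items():
--         if frequency > frequencies.get(char, 0):
--             return False
--     return True
-- ===== SOURCE B (Python) =====
-- def check_if_string_can_be_written(frequencies, string):
--     remaining = dict(frequencies)
--     for char in string:
--         left = remaining.get(char, 0) - 1
--         if left < 0:
--             return False
--         remaining[char] = left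
--     return True
-- ===== Notes on version B (the rewrite author's own statement) =====
-- stated objective: alternative
-- what changed: Replaces A's two-phase count-then-compare (build a full frequency counter of the string, then scan its items) with a single streaming pass that decrements a copied budget per character and returns False at the first deficit.
import Mathlib
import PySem

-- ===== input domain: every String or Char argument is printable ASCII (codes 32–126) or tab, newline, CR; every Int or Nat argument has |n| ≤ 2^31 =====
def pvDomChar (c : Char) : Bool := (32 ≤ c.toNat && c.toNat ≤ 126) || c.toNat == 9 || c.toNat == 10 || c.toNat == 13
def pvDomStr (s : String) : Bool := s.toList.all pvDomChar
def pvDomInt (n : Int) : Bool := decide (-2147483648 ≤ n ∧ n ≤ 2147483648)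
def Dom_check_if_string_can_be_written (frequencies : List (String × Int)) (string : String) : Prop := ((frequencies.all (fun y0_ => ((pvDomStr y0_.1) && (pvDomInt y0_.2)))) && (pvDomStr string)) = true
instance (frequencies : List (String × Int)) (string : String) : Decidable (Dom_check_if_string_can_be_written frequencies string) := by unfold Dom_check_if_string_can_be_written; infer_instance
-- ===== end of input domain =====

-- B replaces A's count-then-compare two-loop structure with a single streaming pass
-- over the string that decrements a copied budget and exits at the first deficit
-- (alternative decomposition, same return value).

-- ===== PORT A =====
-- the second loop of A: 'for char, frequency in string_frequencies.items(): if frequency > frequencies.get(char, 0): return False / return True'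
def pvCheckItems (frequencies : List (String × Int)) : List (String × Int) → Bool
  | [] => true
  | (ch, fr) :: rest =>
      if fr > (PySem.Dict.mk frequencies).getD ch 0 then false
      else pvCheckItems frequencies rest

def check_if_string_can_be_written (frequencies : List (String × Int)) (string : String) : Bool :=
  -- first loop: build string_frequencies via get(char, 0) + 1 assignments
  let string_frequencies : PySem.Dict String Int :=
    (string.toList.map (fun c => String.ofList [c])).foldl
      (fun d ch => d.insert ch (d.getD ch 0 + 1)) PySem.Dict.empty
  pvCheckItems frequencies string_frequencies.items

-- ===== PORT B =====
-- the streaming loop of B: decrement remaining[char], early False on deficit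
def pvBLoop (remaining : PySem.Dict String Int) : List String → Bool
  | [] => true
  | ch :: rest =>
      let left := remaining.getD ch 0 - 1
      if left < 0 then false
      else pvBLoop (remaining.insert ch left) rest

def check_if_string_can_be_written_alt (frequencies : List (String × Int)) (string : String) : Bool :=
  pvBLoop (PySem.Dict.mk frequencies) (string.toList.map (fun c => String.ofList [c]))

-- ===== PRECONDITION & SPEC =====
def Spec_check_if_string_can_be_written (frequencies : List (String × Int)) (string : String) (out : Bool) : Prop := out = check_if_string_can_be_written_alt frequencies string
instance (frequencies : List (String × Int)) (string : String) (out : Bool) : Decidable (Spec_check_if_string_can_be_written frequencies string out) := by unfold Spec_check_if_string_can_be_written; infer_instance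

-- ===== CLAIM (what is proved, stated in full; the proofs are below) =====
def Claim_equal_check_if_string_can_be_written : Prop := ∀ (frequencies : List (String × Int)) (string : String), Dom_check_if_string_can_be_written frequencies string → Spec_check_if_string_can_be_written frequencies string (check_if_string_can_be_written frequencies string)

-- ===== LEMMAS AND PROOFS =====

-- A's item scan is the universal comparison over the items list
theorem pvCheckItems_eq_decide (frequencies : List (String × Int)) (l : List (String × Int)) :
    pvCheckItems frequencies l
      = decide (∀ p ∈ l, p.2 ≤ (PySem.Dict.mk frequencies).getD p.1 0) := by
  induction l with
  | nil => simp [pvCheckItems]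
  | cons p rest ih =>
      obtain ⟨ch, fr⟩ := p
      by_cases h : fr > (PySem.Dict.mk frequencies).getD ch 0
      · simp only [pvCheckItems, if_pos h]
        symm
        simp only [decide_eq_false_iff_not, not_forall]
        exact ⟨(ch, fr), List.mem_cons_self, by simpa using h⟩
      · simp only [pvCheckItems, if_neg h, ih]
        rw [decide_eq_decide]
        push Not at h
        constructor
        · rintro hrest p hp
          rcases List.mem_cons.mp hp with hp | hp
          · simpa [hp] using h
          · exact hrest p hp
        · intro hall p hp
          exact hall p (List.mem_cons_of_mem _ hp)

-- B's streaming loop succeeds iff every character's total count fits the budget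
theorem pvBLoop_eq_decide (cs : List String) :
    ∀ (d : PySem.Dict String Int),
      pvBLoop d cs = decide (∀ k ∈ cs, (cs.count k : Int) ≤ d.getD k 0) := by
  induction cs with
  | nil => intro d; simp [pvBLoop]
  | cons c rest ih =>
      intro d
      by_cases h : d.getD c 0 - 1 < 0
      · simp only [pvBLoop, if_pos h]
        symm
        simp only [decide_eq_false_iff_not, not_forall]
        refine ⟨c, List.mem_cons_self, ?_⟩
        have h1 : (c :: rest).count c = rest.count c + 1 := List.count_cons_self
        rw [h1]
        push_cast
        omega
      · simp only [pvBLoop, if_neg h, ih]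
        rw [decide_eq_decide]
        constructor
        · intro hrest j hj
          rcases List.mem_cons.mp hj with hj | hj
          · -- j = c (head)
            subst hj
            by_cases hc : j ∈ rest
            · have := hrest j hc
              rw [PySem.Dict.getD_insert] at this
              simp at this
              have hcount : (j :: rest).count j = rest.count j + 1 := List.count_cons_self
              rw [hcount]
              push_cast
              omega
            · have hcount : rest.count j = 0 := List.count_eq_zero_of_not_mem hc
              have : (j :: rest).count j = 1 := by simp [List.count_cons_self, hcount]
              rw [this]
              omega
          · -- j ∈ rest
            have := hrest j hj
            rw [PySem.Dict.getD_insert] at this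
            by_cases hjc : j = c
            · subst hjc
              simp at this
              have hcount : (j :: rest).count j = rest.count j + 1 := List.count_cons_self
              rw [hcount]
              push_cast
              omega
            · rw [if_neg hjc] at this
              have hcount : (c :: rest).count j = rest.count j := by
                simp [Ne.symm hjc]
              rw [hcount]
              exact this
        · intro hall j hj
          rw [PySem.Dict.getD_insert]
          by_cases hjc : j = c
          · subst hjc
            have := hall j List.mem_cons_self
            have hcount : (j :: rest).count j = rest.count j + 1 := List.count_cons_self
            rw [hcount] at this
            rw [if_pos rfl]
            push_cast at this
            omega
          · rw [if_neg hjc]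
            have := hall j (List.mem_cons_of_mem _ hj)
            have hcount : (c :: rest).count j = rest.count j := by
              simp [Ne.symm hjc]
            rw [hcount] at this
            exact this

-- ===== VERDICT (by name: the statement is the Claim_ definition above) =====
theorem check_if_string_can_be_written_spec : Claim_equal_check_if_string_can_be_written := by
  intro frequencies string _
  unfold Spec_check_if_string_can_be_written check_if_string_can_be_written check_if_string_can_be_written_alt
  set cs := string.toList.map (fun c => String.ofList [c]) with hcs
  rw [PySem.Dict.foldl_insert_getD_add_one_eq_counter, pvBLoop_eq_decide,
      pvCheckItems_eq_decide, PySem.Dict.items_counter]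
  rw [decide_eq_decide]
  constructor
  · intro hA k hk
    have hk' : k ∈ PySem.Set.ofList cs := (PySem.Set.mem_ofList _ _).mpr hk
    have := hA (k, (cs.count k : Int)) (List.mem_map.mpr ⟨k, hk', rfl⟩)
    exact this
  · intro hB p hp
    rcases List.mem_map.mp hp with ⟨k, hk, rfl⟩
    exact hB k ((PySem.Set.mem_ofList _ _).mp hk)
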